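-- pv_equiv track=rewrite | github.com/Raphailinc/package-comparison-tool | package_comparison_tool/formatting.py | _limit_items
-- ===== SOURCE A (Python) =====
-- from collections.abc import Iterable
-- from typing import TypeVar
--
-- T = TypeVar("T")
--
-- def _limit_items(items: Iterable[T], limit: int | None) -> tuple[list[T], bool]:
--     normalized_limit = None if limit is None or limit <= 0 else limit
--     if normalized_limit is None:
--         return list(items), False
--
--     collected: list[T] = []
--     for idx, item in enumerate(items):
--         if idx >= normalized_limit:
--             return collected, True
--         collected.append(item)
--     return collected, False
-- ===== SOURCE B (Python) =====
-- from collections.abc import Iterable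
-- from typing import TypeVar
--
-- T = TypeVar("T")
--
-- def _limit_items(items: Iterable[T], limit: int | None) -> tuple[list[T], bool]:
--     # Materialize everything once, then decide by comparing lengths and slicing.
--     full = list(items)
--     if limit is None or limit <= 0 or len(full) <= limit:
--         return full, False
--     return full[:limit], True
-- ===== Notes on version B (the rewrite author's own statement) =====
-- stated objective: simpler
-- what changed: Replaces A's incremental enumerate loop with bounded early return by a staged pass: materialize the whole input once, then decide truncation by a length comparison and a single slice (note: for lazy iterables B consumes the entire iterator where A stops after limit+1 items; the return value is identical).
import Mathlib
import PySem

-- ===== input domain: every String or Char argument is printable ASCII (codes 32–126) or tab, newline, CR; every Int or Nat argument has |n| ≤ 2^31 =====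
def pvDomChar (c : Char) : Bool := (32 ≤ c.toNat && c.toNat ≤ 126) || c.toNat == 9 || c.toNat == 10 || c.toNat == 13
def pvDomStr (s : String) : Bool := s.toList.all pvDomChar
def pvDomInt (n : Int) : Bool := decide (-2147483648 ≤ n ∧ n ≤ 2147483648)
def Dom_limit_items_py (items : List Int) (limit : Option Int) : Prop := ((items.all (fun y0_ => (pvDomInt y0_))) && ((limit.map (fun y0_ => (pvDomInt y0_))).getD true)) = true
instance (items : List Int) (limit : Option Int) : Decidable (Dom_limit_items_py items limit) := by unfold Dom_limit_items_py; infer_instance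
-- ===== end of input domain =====

-- B returns the same value via a staged pass — materialize, compare lengths, slice — instead of A's
-- early-returning enumerate loop (simpler; for lazy iterables B consumes the whole iterator, return value unchanged).


-- ===== PORT A =====
-- A's enumerate loop: index, current limit, accumulator; early return (collected, True)
def limitLoopA (items : List Int) (idx : Int) (lim : Int) (collected : List Int) : List Int × Bool :=
  match items with
  | [] => (collected, false)
  | item :: rest =>
    if idx ≥ lim then (collected, true)
    else limitLoopA rest (idx + 1) lim (collected ++ [item])

def limit_items_py (items : List Int) (limit : Option Int) : List Int × Bool :=
  match limit with
  | none => (items, false)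
  | some l => if l ≤ 0 then (items, false) else limitLoopA items 0 l []

-- ===== PORT B =====
-- B: materialize the whole list, then one length comparison and one slice (full[:limit], limit > 0 here)
def limit_items_py_alt (items : List Int) (limit : Option Int) : List Int × Bool :=
  let full := items
  match limit with
  | none => (full, false)
  | some l =>
    if l ≤ 0 then (full, false)
    else if (full.length : Int) ≤ l then (full, false)
    else (full.take l.toNat, true)

-- ===== PRECONDITION & SPEC =====
def Spec_limit_items_py (items : List Int) (limit : Option Int) (out : List Int × Bool) : Prop := out = limit_items_py_alt items limit
instance (items : List Int) (limit : Option Int) (out : List Int × Bool) : Decidable (Spec_limit_items_py items limit out) := by unfold Spec_limit_items_py; infer_instance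

-- ===== CLAIM =====
def Claim_equal_limit_items_py : Prop := ∀ (items : List Int) (limit : Option Int), Dom_limit_items_py items limit → Spec_limit_items_py items limit (limit_items_py items limit)

-- ===== LEMMAS AND PROOFS =====
theorem limitLoopA_eq (lim : Int) :
    ∀ (items : List Int) (idx : Int) (acc : List Int), idx ≤ lim →
    limitLoopA items idx lim acc =
      if items.length ≤ (lim - idx).toNat then (acc ++ items, false)
      else (acc ++ items.take (lim - idx).toNat, true) := by
  intro items
  induction items with
  | nil => intro idx acc _; simp [limitLoopA]
  | cons x rest ih =>
    intro idx acc hle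
    simp only [limitLoopA]
    by_cases hidx : idx ≥ lim
    · have : lim - idx ≤ 0 := by omega
      have h0 : (lim - idx).toNat = 0 := by omega
      simp [hidx, h0]
    · have h1 : idx + 1 ≤ lim := by omega
      rw [if_neg hidx, ih (idx+1) (acc ++ [x]) h1]
      have hk : (lim - idx).toNat = (lim - (idx+1)).toNat + 1 := by omega
      rw [hk]
      simp [List.take_succ_cons]

-- ===== VERDICT =====
theorem limit_items_py_spec : Claim_equal_limit_items_py := by
  intro items limit _
  unfold Spec_limit_items_py limit_items_py limit_items_py_alt
  match limit with
  | none => rfl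
  | some l =>
    by_cases hl : l ≤ 0
    · simp [hl]
    · simp only [if_neg hl]
      rw [limitLoopA_eq l items 0 [] (by omega)]
      have hk : (l - 0).toNat = l.toNat := by omega
      rw [hk]
      by_cases h : items.length ≤ l.toNat
      · have h2 : (items.length : Int) ≤ l := by omega
        simp [h, h2]
      · have h2 : ¬ (items.length : Int) ≤ l := by omega
        simp [h, h2]
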